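-- pv_equiv track=rewrite | github.com/rboulton/adventofcode | 2015/day11.py | has_triple_seq
-- ===== SOURCE A (Python) =====
-- def has_triple_seq(pw):
--     run = 0
--     prev = '0'
--     for ch in pw:
--         if ord(ch) == ord(prev) + 1:
--             run += 1
--             if run >= 3:
--                 return True
--         else:
--             run = 1
--         prev = ch
--     return False
-- ===== SOURCE B (Python) =====
-- def has_triple_seq(pw):
--     return any(ord(b) == ord(a) + 1 and ord(c) == ord(b) + 1
--                for a, b, c in zip(pw, pw[1:], pw[2:]))
-- ===== Notes on version B (the rewrite author's own statement) =====
-- stated objective: idiomatic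
-- what changed: Replaced the stateful run-counter/prev loop by a windowed any() over consecutive triples from zip(pw, pw[1:], pw[2:]); no run counter or prev variable is maintained.
import Mathlib
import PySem

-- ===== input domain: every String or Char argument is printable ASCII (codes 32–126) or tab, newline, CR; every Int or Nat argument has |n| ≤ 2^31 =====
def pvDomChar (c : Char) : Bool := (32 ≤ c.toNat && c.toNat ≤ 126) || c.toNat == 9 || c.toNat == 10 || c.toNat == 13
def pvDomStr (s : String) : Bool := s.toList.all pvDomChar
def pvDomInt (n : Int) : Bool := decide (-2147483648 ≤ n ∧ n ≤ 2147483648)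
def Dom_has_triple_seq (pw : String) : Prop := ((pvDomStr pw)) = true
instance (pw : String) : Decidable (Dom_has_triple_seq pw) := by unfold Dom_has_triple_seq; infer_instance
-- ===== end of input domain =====

-- B replaces A's stateful run-counter/prev loop by a windowed scan over consecutive
-- triples (the port of any(... for a,b,c in zip(pw, pw[1:], pw[2:]))): idiomatic, same cost.


-- ===== PORT A =====
-- A's loop: state (run, prev), early return when run reaches 3.
def pvALoop : List Char → Int → Char → Bool
  | [], _, _ => false
  | ch :: rest, run, prev =>
    if (ch.toNat : Int) = (prev.toNat : Int) + 1 then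
      if run + 1 ≥ 3 then true else pvALoop rest (run + 1) ch
    else
      pvALoop rest 1 ch

def has_triple_seq (pw : String) : Bool := pvALoop pw.toList 0 '0'

-- ===== PORT B =====
-- B: any over the triples of zip(pw, pw[1:], pw[2:]).
def pvBTriples : List Char → Bool
  | a :: b :: c :: rest =>
    if b.toNat = a.toNat + 1 ∧ c.toNat = b.toNat + 1 then true
    else pvBTriples (b :: c :: rest)
  | _ => false

def has_triple_seq_alt (pw : String) : Bool := pvBTriples pw.toList

-- ===== PRECONDITION & SPEC =====
def Spec_has_triple_seq (pw : String) (out : Bool) : Prop := out = has_triple_seq_alt pw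
instance (pw : String) (out : Bool) : Decidable (Spec_has_triple_seq pw out) := by unfold Spec_has_triple_seq; infer_instance

-- ===== CLAIM (what is proved, stated in full; the proofs are below) =====
def Claim_equal_has_triple_seq : Prop := ∀ (pw : String), Dom_has_triple_seq pw → Spec_has_triple_seq pw (has_triple_seq pw)

-- ===== LEMMAS AND PROOFS =====

-- Joint loop invariant: with run = 1 the A-loop equals B's triple scan seeded with prev;
-- with run = 2 it additionally may fire immediately on the head.
theorem pvALoop_key (l : List Char) :
    (∀ prev, pvALoop l 1 prev = pvBTriples (prev :: l)) ∧
    (∀ q, pvALoop l 2 q =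
      ((match l with | c :: _ => decide (c.toNat = q.toNat + 1) | [] => false) || pvBTriples (q :: l))) := by
  induction l with
  | nil => exact ⟨fun prev => rfl, fun q => rfl⟩
  | cons ch rest ih =>
    refine ⟨fun prev => ?_, fun q => ?_⟩
    · by_cases h : (ch.toNat : Int) = (prev.toNat : Int) + 1
      · have hnat : ch.toNat = prev.toNat + 1 := by exact_mod_cast h
        simp only [pvALoop, if_pos h]
        norm_num
        rw [ih.2 ch]
        cases rest with
        | nil => simp [pvBTriples]
        | cons c rs =>
          by_cases hc : c.toNat = ch.toNat + 1
          · simp [pvBTriples, hc, hnat]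
          · simp [pvBTriples, hc, hnat]
      · have hnat : ¬ ch.toNat = prev.toNat + 1 := by
          intro hn; exact h (by exact_mod_cast hn)
        simp only [pvALoop, if_neg h]
        rw [ih.1 ch]
        cases rest with
        | nil => simp [pvBTriples]
        | cons c rs => simp [pvBTriples, hnat]
    · by_cases h : (ch.toNat : Int) = (q.toNat : Int) + 1
      · have hnat : ch.toNat = q.toNat + 1 := by exact_mod_cast h
        simp [pvALoop, h, hnat]
      · have hnat : ¬ ch.toNat = q.toNat + 1 := by
          intro hn; exact h (by exact_mod_cast hn)
        simp only [pvALoop, if_neg h]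
        rw [ih.1 ch]
        cases rest with
        | nil => simp [pvBTriples, hnat]
        | cons c rs => simp [pvBTriples, hnat]

-- ===== VERDICT (by name: the statement is the Claim_ definition above) =====
theorem has_triple_seq_spec : Claim_equal_has_triple_seq := by
  intro pw _
  unfold Spec_has_triple_seq has_triple_seq has_triple_seq_alt
  cases hl : pw.toList with
  | nil => rfl
  | cons ch rest =>
    by_cases h : (ch.toNat : Int) = ('0'.toNat : Int) + 1
    · simp only [pvALoop, if_pos h]
      norm_num
      exact (pvALoop_key rest).1 ch
    · simp only [pvALoop, if_neg h]
      exact (pvALoop_key rest).1 ch
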